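-- pv_equiv track=rewrite | github.com/kishuuu21/temp | python/missing.py | find_missing_2
-- ===== SOURCE A (Python) =====
-- def find_missing_2(arr,x1):
--     n=len(arr)
--     z = 0
--     for i in range(1,n):
--         if (arr[i-1]< arr[i]):
--             pass
--         else:
--             if (i+1 < n) and arr[i+1]> arr[i]:
--                 z = i
--             # arr.remove(arr[i-1])
--     for j in range(z):
--         if (arr[j+1] - arr[j] > 1):
--            return arr[j]+1
--     for k in range(z,n-1):
--         if (arr[k+1] - arr[k] > 1):
--            return arr[k]+1
--
-- arr = [5,7,1,2,3,4]
-- ===== SOURCE B (Python) =====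
-- def find_missing_2(arr, x1):
--     # single pairwise pass: the two scans in A together cover every adjacent pair in order
--     for a, b in zip(arr, arr[1:]):
--         if b - a > 1:
--             return a + 1
--     return None
-- ===== Notes on version B (the rewrite author's own statement) =====
-- stated objective: simpler
-- what changed: B drops A's pivot-finding loop and the two-segment scan entirely: since A's two scans together traverse every adjacent pair in order, B is one structural pairwise pass over zip(arr, arr[1:]) returning arr[i]+1 at the first gap (fewer passes and no index arithmetic).
import Mathlib
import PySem

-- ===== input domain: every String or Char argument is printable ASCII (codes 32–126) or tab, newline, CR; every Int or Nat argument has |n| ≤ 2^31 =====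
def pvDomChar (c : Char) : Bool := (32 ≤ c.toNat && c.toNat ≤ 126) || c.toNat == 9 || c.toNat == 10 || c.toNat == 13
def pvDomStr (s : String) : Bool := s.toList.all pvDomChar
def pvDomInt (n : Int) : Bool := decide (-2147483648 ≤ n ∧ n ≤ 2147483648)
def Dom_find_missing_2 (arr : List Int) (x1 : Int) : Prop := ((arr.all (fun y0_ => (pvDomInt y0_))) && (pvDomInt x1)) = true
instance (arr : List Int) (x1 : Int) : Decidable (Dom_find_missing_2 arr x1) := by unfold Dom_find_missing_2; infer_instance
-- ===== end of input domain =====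

-- B replaces A's pivot computation and two-segment scan by a single pairwise pass (simpler decomposition, same O(n) cost).

-- ===== PORT A =====
-- 'for idx in idxs: if arr[idx+1]-arr[idx] > 1: return arr[idx]+1' (shared shape of A's two scan loops)
def scanGap (arr : List Int) : List Int → Option Int
  | [] => none
  | j :: rest =>
      if PySem.List.pyGetD arr (j + 1) 0 - PySem.List.pyGetD arr j 0 > 1 then
        some (PySem.List.pyGetD arr j 0 + 1)
      else scanGap arr rest

def find_missing_2 (arr : List Int) (x1 : Int) : Option Int :=
  let n : Int := arr.length
  let z : Int :=
    (PySem.List.pyRange 1 n 1).foldl (fun z i =>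
      if PySem.List.pyGetD arr (i - 1) 0 < PySem.List.pyGetD arr i 0 then z
      else if i + 1 < n ∧ PySem.List.pyGetD arr (i + 1) 0 > PySem.List.pyGetD arr i 0 then i
      else z) 0
  match scanGap arr (PySem.List.pyRange 0 z 1) with
  | some v => some v
  | none => scanGap arr (PySem.List.pyRange z (n - 1) 1)

-- ===== PORT B =====
-- 'for a, b in zip(arr, arr[1:]): if b - a > 1: return a + 1; return None'
def pairGap : List Int → Option Int
  | a :: b :: rest => if b - a > 1 then some (a + 1) else pairGap (b :: rest)
  | _ => none

def find_missing_2_alt (arr : List Int) (_x1 : Int) : Option Int := pairGap arr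

-- ===== PRECONDITION & SPEC =====
def Spec_find_missing_2 (arr : List Int) (x1 : Int) (out : Option Int) : Prop := out = find_missing_2_alt arr x1
instance (arr : List Int) (x1 : Int) (out : Option Int) : Decidable (Spec_find_missing_2 arr x1 out) := by unfold Spec_find_missing_2; infer_instance

-- ===== CLAIM (what is proved, stated in full; the proofs are below) =====
def Claim_equal_find_missing_2 : Prop := ∀ (arr : List Int) (x1 : Int), Dom_find_missing_2 arr x1 → Spec_find_missing_2 arr x1 (find_missing_2 arr x1)

-- ===== LEMMAS AND PROOFS =====

theorem scanGap_append (arr : List Int) (l1 l2 : List Int) :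
    scanGap arr (l1 ++ l2) =
      match scanGap arr l1 with
      | some v => some v
      | none => scanGap arr l2 := by
  induction l1 with
  | nil => simp [scanGap]
  | cons j rest ih =>
      simp only [List.cons_append, scanGap]
      split_ifs <;> simp [ih]

-- the pivot z computed by A's first loop satisfies 0 ≤ z ≤ n - 1 (for n ≥ 1)
theorem z_bound (arr : List Int) (n : Int) :
    ∀ (l : List Int), (∀ i ∈ l, 1 ≤ i) → ∀ (z0 : Int), 0 ≤ z0 → z0 ≤ n - 1 →
      (0 ≤ l.foldl (fun z i =>
          if PySem.List.pyGetD arr (i - 1) 0 < PySem.List.pyGetD arr i 0 then z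
          else if i + 1 < n ∧ PySem.List.pyGetD arr (i + 1) 0 > PySem.List.pyGetD arr i 0 then i
          else z) z0 ∧
        l.foldl (fun z i =>
          if PySem.List.pyGetD arr (i - 1) 0 < PySem.List.pyGetD arr i 0 then z
          else if i + 1 < n ∧ PySem.List.pyGetD arr (i + 1) 0 > PySem.List.pyGetD arr i 0 then i
          else z) z0 ≤ n - 1) := by
  intro l
  induction l with
  | nil => intro _ z0 h0 h1; exact ⟨h0, h1⟩
  | cons i rest ih =>
      intro hl z0 h0 h1
      have hi : 1 ≤ i := hl i (by simp)
      have hl' : ∀ j ∈ rest, 1 ≤ j := fun j hj => hl j (by simp [hj])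
      simp only [List.foldl_cons]
      split_ifs with h2 h3
      · exact ih hl' z0 h0 h1
      · exact ih hl' i (by omega) (by omega)
      · exact ih hl' z0 h0 h1

-- shifting one cons off the array shifts all (≥ 1) indices down by one
theorem pyGetD_cons_shift (a : Int) (xs : List Int) (j : Int) (hj : 1 ≤ j) :
    PySem.List.pyGetD (a :: xs) j 0 = PySem.List.pyGetD xs (j - 1) 0 := by
  obtain ⟨k, rfl⟩ : ∃ k : ℕ, j = (k : Int) + 1 := ⟨(j - 1).toNat, by omega⟩
  simp only [PySem.List.pyGetD, PySem.List.pyGet?_cons_succ, add_sub_cancel_right]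

theorem scanGap_shift (a : Int) (xs : List Int) :
    ∀ (l : List Int), (∀ j ∈ l, 1 ≤ j) →
      scanGap (a :: xs) l = scanGap xs (l.map (· - 1)) := by
  intro l
  induction l with
  | nil => intro _; simp [scanGap]
  | cons j rest ih =>
      intro h
      have hj : 1 ≤ j := h j (by simp)
      have e1 : PySem.List.pyGetD (a :: xs) j 0 = PySem.List.pyGetD xs (j - 1) 0 :=
        pyGetD_cons_shift a xs j hj
      have e2 : PySem.List.pyGetD (a :: xs) (j + 1) 0 = PySem.List.pyGetD xs j 0 := by
        rw [pyGetD_cons_shift a xs (j + 1) (by omega)]; norm_num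
      simp only [List.map_cons, scanGap, e1, e2]
      have : j - 1 + 1 = j := by omega
      rw [this]
      split_ifs
      · rfl
      · exact ih (fun x hx => h x (by simp [hx]))

theorem range_shift (m : Int) :
    (PySem.List.pyRange 1 m 1).map (· - 1) = PySem.List.pyRange 0 (m - 1) 1 := by
  rw [PySem.List.pyRange_one, PySem.List.pyRange_one, List.map_map]
  simp

-- the full scan over all adjacent pairs IS B's pairwise pass
theorem scan_all (xs : List Int) :
    scanGap xs (PySem.List.pyRange 0 ((xs.length : Int) - 1) 1) = pairGap xs := by
  induction xs with
  | nil => simp [PySem.List.pyRange_one_eq_nil, scanGap, pairGap]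
  | cons a t ih =>
      cases t with
      | nil =>
          simp [PySem.List.pyRange_one_eq_nil, scanGap, pairGap]
      | cons b r =>
          have hlen : ((a :: b :: r).length : Int) - 1 = (r.length : Int) + 1 := by
            simp
          rw [hlen, PySem.List.pyRange_one_cons (by omega)]
          have e1 : PySem.List.pyGetD (a :: b :: r) (0 + 1) 0 = b := by
            rw [show ((0 : Int) + 1) = ((1 : Nat) : Int) + 0 by norm_num]
            rw [show (((1 : Nat) : Int) + 0) = ((0 : Nat) : Int) + 1 by norm_num]
            rw [pyGetD_cons_shift _ _ _ (by omega)]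
            norm_num [PySem.List.pyGetD_zero_cons]
          have e0 : PySem.List.pyGetD (a :: b :: r) 0 0 = a :=
            PySem.List.pyGetD_zero_cons a (b :: r) 0
          simp only [scanGap, e1, e0, pairGap]
          split_ifs with h
          · rfl
          · rw [show (0 : Int) + 1 = 1 by norm_num,
                scanGap_shift a (b :: r)
                  (PySem.List.pyRange 1 ((r.length : Int) + 1) 1)
                  (fun j hj => (PySem.List.mem_pyRange_one.mp hj).1),
                range_shift]
            have h2 : ((r.length : Int) + 1) - 1 = ((b :: r).length : Int) - 1 := by simp
            rw [h2, ih]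

-- ===== VERDICT (by name: the statement is the Claim_ definition above) =====
theorem find_missing_2_spec : Claim_equal_find_missing_2 := by
  intro arr x1 _
  unfold Spec_find_missing_2 find_missing_2 find_missing_2_alt
  dsimp only
  by_cases hn : 1 ≤ (arr.length : Int)
  · obtain ⟨hz0, hz1⟩ := z_bound arr (arr.length : Int)
      (PySem.List.pyRange 1 (arr.length : Int) 1)
      (fun i hi => (PySem.List.mem_pyRange_one.mp hi).1) 0 le_rfl (by omega)
    rw [← scanGap_append, ← PySem.List.pyRange_one_append 0 _ _ hz0 hz1, scan_all]
  · have : arr = [] := by cases arr with | nil => rfl | cons a t => simp at hn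
    subst this
    simp [PySem.List.pyRange_one_eq_nil, scanGap, pairGap]
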